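-- pv_equiv track=rewrite | github.com/kkk85/sparta | 알고리즘 코드카타/57  수 조작하기 1 .py | solution
-- ===== SOURCE A (Python) =====
-- def solution(n, control):
--     for index in control:
--         if index == "w":
--             n += 1 # w": 현재 숫자를 1 증가
--         if index == "s":
--             n -= 1 # "s": 현재 숫자를 1 감소
--         if index == "d":
--             n += 10 # "d": 현재 숫자를 10 증가
--         if index == "a":
--             n -= 10 # "a": 현재 숫자를 10 감소
--     return n
-- ===== SOURCE B (Python) =====
-- def solution(n, control):
--     # Closed form from character counts instead of a running loop.
--     return n + control.count("w") - control.count("s") + 10 * (control.count("d") - control.count("a"))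
-- ===== Notes on version B (the rewrite author's own statement) =====
-- stated objective: faster
-- what changed: Replaces the per-character accumulation loop with four str.count tallies combined in one closed-form arithmetic expression.
import Mathlib
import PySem

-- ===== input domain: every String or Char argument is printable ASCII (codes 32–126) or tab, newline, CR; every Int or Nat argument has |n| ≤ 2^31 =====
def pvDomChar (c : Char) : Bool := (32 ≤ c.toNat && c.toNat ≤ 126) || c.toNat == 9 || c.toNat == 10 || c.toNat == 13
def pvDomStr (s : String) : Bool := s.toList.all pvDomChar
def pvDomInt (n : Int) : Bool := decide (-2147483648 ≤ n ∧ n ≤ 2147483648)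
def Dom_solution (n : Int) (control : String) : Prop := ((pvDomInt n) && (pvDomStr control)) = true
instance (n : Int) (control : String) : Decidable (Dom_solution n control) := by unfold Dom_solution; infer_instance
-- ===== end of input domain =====

-- B replaces A's per-character accumulation loop by four str.count tallies combined in one
-- closed-form expression (alternative decomposition, same asymptotic cost).

-- ===== PORT A =====
def solution (n : Int) (control : String) : Int :=
  control.toList.foldl (fun n index =>
    let n := if index = 'w' then n + 1 else n
    let n := if index = 's' then n - 1 else n
    let n := if index = 'd' then n + 10 else n
    let n := if index = 'a' then n - 10 else n
    n) n

-- ===== PORT B =====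
def solution_alt (n : Int) (control : String) : Int :=
  n + PySem.Str.count control "w" - PySem.Str.count control "s"
    + 10 * ((PySem.Str.count control "d" : Int) - PySem.Str.count control "a")

-- ===== PRECONDITION & SPEC =====
def Spec_solution (n : Int) (control : String) (out : Int) : Prop := out = solution_alt n control
instance (n : Int) (control : String) (out : Int) : Decidable (Spec_solution n control out) := by unfold Spec_solution; infer_instance

-- ===== CLAIM (what is proved, stated in full; the proofs are below) =====
def Claim_equal_solution : Prop := ∀ (n : Int) (control : String), Dom_solution n control → Spec_solution n control (solution n control)

-- ===== LEMMAS AND PROOFS =====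

-- PySem.Chars.count on a one-character needle is List.count (the go loop has enough fuel).
theorem go_single (c : Char) : ∀ (l : List Char) (fuel acc : Nat), l.length ≤ fuel →
    PySem.Chars.count.go [c] fuel l acc = acc + l.count c := by
  intro l
  induction l with
  | nil => intro fuel acc _; cases fuel <;> simp [PySem.Chars.count.go]
  | cons h t ih =>
    intro fuel acc hle
    cases fuel with
    | zero => simp at hle
    | succ f =>
      rw [PySem.Chars.count.go]
      simp only [List.length_cons] at hle
      by_cases hc : c = h
      · subst hc
        simp [List.isPrefixOf, ih f (acc + 1) (by omega)]
        omega
      · simp [List.isPrefixOf, hc, Ne.symm hc, ih f acc (by omega)]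

theorem count_single (l : List Char) (c : Char) : PySem.Chars.count l [c] = l.count c := by
  simp [PySem.Chars.count, go_single c l l.length 0 le_rfl]

-- A's loop computes the closed form.
theorem foldl_wasd (l : List Char) : ∀ (n : Int),
    l.foldl (fun n index =>
      let n := if index = 'w' then n + 1 else n
      let n := if index = 's' then n - 1 else n
      let n := if index = 'd' then n + 10 else n
      let n := if index = 'a' then n - 10 else n
      n) n
    = n + l.count 'w' - l.count 's' + 10 * ((l.count 'd' : Int) - l.count 'a') := by
  induction l with
  | nil => intro n; simp
  | cons c cs ih =>
    intro n
    simp only [List.foldl_cons, List.count_cons, ih]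
    by_cases hw : c = 'w' <;> by_cases hs : c = 's' <;>
      by_cases hd : c = 'd' <;> by_cases ha : c = 'a' <;>
      simp_all <;> ring

-- ===== VERDICT (by name: the statement is the Claim_ definition above) =====
theorem solution_spec : Claim_equal_solution := by
  intro n control _
  unfold Spec_solution solution solution_alt
  rw [PySem.Str.count_eq, PySem.Str.count_eq, PySem.Str.count_eq, PySem.Str.count_eq]
  rw [foldl_wasd]
  have hw : ("w" : String).toList = ['w'] := rfl
  have hs : ("s" : String).toList = ['s'] := rfl
  have hd : ("d" : String).toList = ['d'] := rfl
  have ha : ("a" : String).toList = ['a'] := rfl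
  rw [hw, hs, hd, ha, count_single, count_single, count_single, count_single]
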